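-- pv_equiv track=rewrite | github.com/HKUST-KnowComp/GoldCoin | eval/parse_eval_result.py | first_applicability_result
-- ===== SOURCE A (Python) =====
-- def first_applicability_result(response):
--     result = ""
--     labels = ["applicable", "apply to", "applies to", " not "]
--     first_label_index = len(response)
--     first_label = ""
--     for label in labels:
--         if label in response:
--             label_index = response.index(label)
--             if label_index < first_label_index:
--                 first_label_index = label_index
--                 first_label = label
--
--     if first_label in ["applicable", "apply to", "applies to"]:
--         result = "applicable"
--     elif first_label in [" not "]:
--         result = "not applicable"
--     return result
-- ===== SOURCE B (Python) =====
-- def first_applicability_result(response):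
--     # Single left-to-right scan: classify by the first position where any label starts.
--     for i in range(len(response)):
--         if response.startswith(("applicable", "apply to", "applies to"), i):
--             return "applicable"
--         if response.startswith(" not ", i):
--             return "not applicable"
--     return ""
-- ===== Notes on version B (the rewrite author's own statement) =====
-- stated objective: idiomatic
-- what changed: Replaces the four separate substring-index scans with minimum-index bookkeeping by one single left-to-right scan that returns at the first position where any of the four labels starts.
import Mathlib
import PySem

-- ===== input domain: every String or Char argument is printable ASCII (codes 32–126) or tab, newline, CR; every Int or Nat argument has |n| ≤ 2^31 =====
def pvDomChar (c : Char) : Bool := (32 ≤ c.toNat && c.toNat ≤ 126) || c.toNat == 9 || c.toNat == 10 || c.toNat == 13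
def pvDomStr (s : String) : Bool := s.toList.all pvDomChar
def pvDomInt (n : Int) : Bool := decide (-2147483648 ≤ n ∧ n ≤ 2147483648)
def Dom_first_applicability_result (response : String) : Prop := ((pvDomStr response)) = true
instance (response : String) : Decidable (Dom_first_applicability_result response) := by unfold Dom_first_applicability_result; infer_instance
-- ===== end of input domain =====

-- B replaces A's four per-label `.index` scans with a single left-to-right scan that stops
-- at the first position where any label starts (idiomatic single pass; same return value).

-- ===== PORT A =====
-- transliteration of A: fold over the label list tracking (first_label_index, first_label);
-- `response.index(label)` is guarded by `label in response`, so it equals `find` there.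
def first_applicability_result (response : String) : String :=
  let cs := response.toList
  let labels : List String := ["applicable", "apply to", "applies to", " not "]
  let st :=
    labels.foldl
      (fun (st : Int × String) label =>
        if PySem.Chars.isIn label.toList cs then
          let label_index := PySem.Chars.find cs label.toList
          if label_index < st.1 then (label_index, label) else st
        else st)
      ((cs.length : Int), "")
  if st.2 = "applicable" ∨ st.2 = "apply to" ∨ st.2 = "applies to" then "applicable"
  else if st.2 = " not " then "not applicable"
  else ""

-- ===== PORT B =====
-- transliteration of B: scan positions left to right, return at the first label start.
def altGo : List Char → String
  | [] => ""
  | c :: rest =>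
    if "applicable".toList.isPrefixOf (c :: rest) || "apply to".toList.isPrefixOf (c :: rest)
        || "applies to".toList.isPrefixOf (c :: rest) then "applicable"
    else if " not ".toList.isPrefixOf (c :: rest) then "not applicable"
    else altGo rest

def first_applicability_result_alt (response : String) : String :=
  altGo response.toList

-- ===== PRECONDITION & SPEC =====
def Spec_first_applicability_result (response : String) (out : String) : Prop := out = first_applicability_result_alt response
instance (response : String) (out : String) : Decidable (Spec_first_applicability_result response out) := by unfold Spec_first_applicability_result; infer_instance

-- ===== CLAIM (what is proved, stated in full; the proofs are below) =====
def Claim_equal_first_applicability_result : Prop := ∀ (response : String), Dom_first_applicability_result response → Spec_first_applicability_result response (first_applicability_result response)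

-- ===== LEMMAS AND PROOFS =====

-- A's fold step and final classification, named for the proofs.
def step (cs : List Char) (st : Int × String) (label : String) : Int × String :=
  if PySem.Chars.isIn label.toList cs then
    if PySem.Chars.find cs label.toList < st.1 then (PySem.Chars.find cs label.toList, label) else st
  else st

def aFold (cs : List Char) : Int × String :=
  (["applicable", "apply to", "applies to", " not "]).foldl (step cs) ((cs.length : Int), "")

def classify (st : Int × String) : String :=
  if st.2 = "applicable" ∨ st.2 = "apply to" ∨ st.2 = "applies to" then "applicable"
  else if st.2 = " not " then "not applicable"
  else ""

lemma A_eq (s : String) : first_applicability_result s = classify (aFold s.toList) := rfl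

lemma find_eq_of_least (cs sub : List Char) (j : Nat) (hj : sub <+: cs.drop j)
    (hmin : ∀ i < j, ¬ sub <+: cs.drop i) : PySem.Chars.find cs sub = (j : Int) := by
  
  have hin : PySem.Chars.isIn sub cs = true :=
    (PySem.Chars.exists_prefix_drop_iff_isIn sub cs).mp ⟨j, hj⟩
  have hnn : 0 ≤ PySem.Chars.find cs sub :=
    (PySem.Chars.find_nonneg_iff cs sub).mpr ((PySem.Chars.isIn_iff_infix sub cs).mp hin)
  obtain ⟨h1, h2⟩ := PySem.Chars.find_spec hnn
  have : (PySem.Chars.find cs sub).toNat = j := by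
    rcases Nat.lt_trichotomy (PySem.Chars.find cs sub).toNat j with h | h | h
    · exact absurd h1 (hmin _ h)
    · exact h
    · exact absurd hj (h2 j h)
  omega

lemma isIn_cons_of_not_prefix (c : Char) (cs sub : List Char) (h0 : ¬ sub <+: (c :: cs)) :
    PySem.Chars.isIn sub (c :: cs) = PySem.Chars.isIn sub cs := by
  
  by_cases h : PySem.Chars.isIn sub cs = true
  · rw [h]
    obtain ⟨j, hj⟩ := (PySem.Chars.exists_prefix_drop_iff_isIn sub cs).mpr h
    exact (PySem.Chars.exists_prefix_drop_iff_isIn sub _).mp ⟨j + 1, hj⟩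
  · rw [Bool.eq_false_iff.mpr h, Bool.eq_false_iff]
    intro h'
    obtain ⟨j, hj⟩ := (PySem.Chars.exists_prefix_drop_iff_isIn sub _).mpr h'
    cases j with
    | zero => exact h0 hj
    | succ j => exact h ((PySem.Chars.exists_prefix_drop_iff_isIn sub cs).mp ⟨j, hj⟩)

lemma find_cons_of_not_prefix (c : Char) (cs sub : List Char) (h0 : ¬ sub <+: (c :: cs))
    (hin : PySem.Chars.isIn sub cs = true) :
    PySem.Chars.find (c :: cs) sub = PySem.Chars.find cs sub + 1 := by
  
  have hnn : 0 ≤ PySem.Chars.find cs sub :=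
    (PySem.Chars.find_nonneg_iff cs sub).mpr ((PySem.Chars.isIn_iff_infix sub cs).mp hin)
  obtain ⟨h1, h2⟩ := PySem.Chars.find_spec hnn
  have hfind := find_eq_of_least (c :: cs) sub ((PySem.Chars.find cs sub).toNat + 1)
    (by simpa using h1)
    (by
      intro i hi
      cases i with
      | zero => exact h0
      | succ i => exact fun hp => h2 i (by omega) hp)
  omega

lemma step_stay (cs : List Char) (s : Int × String) (L : String) (h : s.1 ≤ 0) :
    step cs s L = s := by
  
  unfold step
  split_ifs with h1 h2
  · have : 0 ≤ PySem.Chars.find cs L.toList :=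
      (PySem.Chars.find_nonneg_iff cs L.toList).mpr ((PySem.Chars.isIn_iff_infix _ cs).mp h1)
    omega
  · rfl
  · rfl

lemma step_pos (cs : List Char) (s : Int × String) (L : String) (hs : 0 < s.1)
    (h0 : ¬ (L.toList <+: cs)) : 0 < (step cs s L).1 := by
  
  unfold step
  split_ifs with h1 h2
  · have hnn : 0 ≤ PySem.Chars.find cs L.toList :=
      (PySem.Chars.find_nonneg_iff cs L.toList).mpr ((PySem.Chars.isIn_iff_infix _ cs).mp h1)
    obtain ⟨hp, -⟩ := PySem.Chars.find_spec hnn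
    have : PySem.Chars.find cs L.toList ≠ 0 := by
      intro h
      rw [h] at hp
      exact h0 (by simpa using hp)
    simp only []
    omega
  · exact hs
  · exact hs

lemma step_hit (cs : List Char) (s : Int × String) (L : String)
    (hj : L.toList <+: cs) (hf : PySem.Chars.find cs L.toList < s.1) :
    step cs s L = (PySem.Chars.find cs L.toList, L) := by
  
  unfold step
  rw [if_pos ((PySem.Chars.isIn_iff_infix _ cs).mpr hj.isInfix), if_pos hf]

lemma fold_shift (c : Char) (cs : List Char) (labels : List String)
    (h : ∀ L ∈ labels, ¬ (L.toList <+: c :: cs)) (s : Int × String) :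
    labels.foldl (step (c :: cs)) (s.1 + 1, s.2)
      = ((labels.foldl (step cs) s).1 + 1, (labels.foldl (step cs) s).2) := by
  
  induction labels generalizing s with
  | nil => rfl
  | cons L rest ih =>
    have hL := h L (by simp)
    have hrest : ∀ L ∈ rest, ¬ (L.toList <+: c :: cs) := fun M hM => h M (by simp [hM])
    have hstep : step (c :: cs) (s.1 + 1, s.2) L = ((step cs s L).1 + 1, (step cs s L).2) := by
      unfold step
      rw [isIn_cons_of_not_prefix c cs L.toList hL]
      by_cases hin : PySem.Chars.isIn L.toList cs = true
      · rw [if_pos hin, if_pos hin, find_cons_of_not_prefix c cs L.toList hL hin]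
        by_cases hlt : PySem.Chars.find cs L.toList < s.1
        · rw [if_pos (by omega), if_pos hlt]
        · rw [if_neg (by omega), if_neg hlt]
      · rw [if_neg hin, if_neg hin]
    rw [List.foldl_cons, List.foldl_cons, hstep, ih hrest]

set_option maxHeartbeats 1000000 in
lemma main_eq (cs : List Char) : classify (aFold cs) = altGo cs := by
  induction cs with
  | nil => decide
  | cons c rest ih =>
    have hlen : (0 : Int) < ((c :: rest).length : Int) := by simp
    have hunf : aFold (c :: rest)
        = step (c :: rest) (step (c :: rest) (step (c :: rest)
            (step (c :: rest) ((((c :: rest).length : Nat) : Int), "") "applicable")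
            "apply to") "applies to") " not " := rfl
    by_cases pa : "applicable".toList <+: (c :: rest)
    · -- "applicable" starts at position 0
      have f0 : PySem.Chars.find (c :: rest) "applicable".toList = 0 :=
        find_eq_of_least _ _ 0 (by simpa using pa) (by omega)
      have st1 : step (c :: rest) ((((c :: rest).length : Nat) : Int), "") "applicable"
          = (0, "applicable") := by
        rw [step_hit _ _ _ pa (by rw [f0]; exact hlen), f0]
      have st2 : step (c :: rest) ((0 : Int), "applicable") "apply to" = (0, "applicable") :=
        step_stay _ _ _ (by norm_num)
      have st3 : step (c :: rest) ((0 : Int), "applicable") "applies to" = (0, "applicable") :=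
        step_stay _ _ _ (by norm_num)
      have st4 : step (c :: rest) ((0 : Int), "applicable") " not " = (0, "applicable") :=
        step_stay _ _ _ (by norm_num)
      have hB : altGo (c :: rest) = "applicable" := by
        simp only [altGo]
        rw [if_pos (by simp only [Bool.or_eq_true, List.isPrefixOf_iff_prefix]; exact Or.inl (Or.inl pa))]
      rw [hunf, st1, st2, st3, st4, hB]; decide
    · by_cases pb : "apply to".toList <+: (c :: rest)
      · have f0 : PySem.Chars.find (c :: rest) "apply to".toList = 0 :=
          find_eq_of_least _ _ 0 (by simpa using pb) (by omega)
        have h1 : 0 < (step (c :: rest) ((((c :: rest).length : Nat) : Int), "") "applicable").1 :=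
          step_pos _ _ _ hlen pa
        have st2 : step (c :: rest)
            (step (c :: rest) ((((c :: rest).length : Nat) : Int), "") "applicable") "apply to"
            = (0, "apply to") := by
          rw [step_hit _ _ _ pb (by rw [f0]; exact h1), f0]
        have st3 : step (c :: rest) ((0 : Int), "apply to") "applies to" = (0, "apply to") :=
          step_stay _ _ _ (by norm_num)
        have st4 : step (c :: rest) ((0 : Int), "apply to") " not " = (0, "apply to") :=
          step_stay _ _ _ (by norm_num)
        have hB : altGo (c :: rest) = "applicable" := by
          simp only [altGo]
          rw [if_pos (by simp only [Bool.or_eq_true, List.isPrefixOf_iff_prefix]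
                         exact Or.inl (Or.inr pb))]
        rw [hunf, st2, st3, st4, hB]; decide
      · by_cases pc : "applies to".toList <+: (c :: rest)
        · have f0 : PySem.Chars.find (c :: rest) "applies to".toList = 0 :=
            find_eq_of_least _ _ 0 (by simpa using pc) (by omega)
          have h1 : 0 < (step (c :: rest) ((((c :: rest).length : Nat) : Int), "") "applicable").1 :=
            step_pos _ _ _ hlen pa
          have h2 : 0 < (step (c :: rest) (step (c :: rest)
              ((((c :: rest).length : Nat) : Int), "") "applicable") "apply to").1 :=
            step_pos _ _ _ h1 pb
          have st3 : step (c :: rest) (step (c :: rest)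
              (step (c :: rest) ((((c :: rest).length : Nat) : Int), "") "applicable") "apply to")
              "applies to" = (0, "applies to") := by
            rw [step_hit _ _ _ pc (by rw [f0]; exact h2), f0]
          have st4 : step (c :: rest) ((0 : Int), "applies to") " not " = (0, "applies to") :=
            step_stay _ _ _ (by norm_num)
          have hB : altGo (c :: rest) = "applicable" := by
            simp only [altGo]
            rw [if_pos (by simp only [Bool.or_eq_true, List.isPrefixOf_iff_prefix]
                           exact Or.inr pc)]
          rw [hunf, st3, st4, hB]; decide
        · have hnA : ((("applicable".toList.isPrefixOf (c :: rest)
                || "apply to".toList.isPrefixOf (c :: rest))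
                || "applies to".toList.isPrefixOf (c :: rest)) = true) → False := by
            simp only [Bool.or_eq_true, List.isPrefixOf_iff_prefix]
            exact fun h => h.elim (fun h => h.elim (fun h => pa h) (fun h => pb h)) (fun h => pc h)
          by_cases pn : " not ".toList <+: (c :: rest)
          · have f0 : PySem.Chars.find (c :: rest) " not ".toList = 0 :=
              find_eq_of_least _ _ 0 (by simpa using pn) (by omega)
            have h1 : 0 < (step (c :: rest) ((((c :: rest).length : Nat) : Int), "") "applicable").1 :=
              step_pos _ _ _ hlen pa
            have h2 : 0 < (step (c :: rest) (step (c :: rest)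
                ((((c :: rest).length : Nat) : Int), "") "applicable") "apply to").1 :=
              step_pos _ _ _ h1 pb
            have h3 : 0 < (step (c :: rest) (step (c :: rest) (step (c :: rest)
                ((((c :: rest).length : Nat) : Int), "") "applicable") "apply to") "applies to").1 :=
              step_pos _ _ _ h2 pc
            have st4 : step (c :: rest) (step (c :: rest) (step (c :: rest)
                (step (c :: rest) ((((c :: rest).length : Nat) : Int), "") "applicable")
                "apply to") "applies to") " not " = (0, " not ") := by
              rw [step_hit _ _ _ pn (by rw [f0]; exact h3), f0]
            have hB : altGo (c :: rest) = "not applicable" := by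
              simp only [altGo]
              rw [if_neg (by exact fun h => hnA h),
                  if_pos (List.isPrefixOf_iff_prefix.mpr pn)]
            rw [hunf, st4, hB]; decide
          · -- no label starts at position 0: both programs move to the tail
            have h4 : ∀ L ∈ (["applicable", "apply to", "applies to", " not "] : List String),
                ¬ (L.toList <+: c :: rest) := by
              intro L hL
              simp only [List.mem_cons, List.not_mem_nil, or_false] at hL
              rcases hL with rfl | rfl | rfl | rfl <;> assumption
            have hshift : aFold (c :: rest) = ((aFold rest).1 + 1, (aFold rest).2) := by
              have hfs := fold_shift c rest _ h4 (((rest.length : Nat) : Int), "")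
              unfold aFold
              rw [← hfs]
              congr 1
            have hB : altGo (c :: rest) = altGo rest := by
              simp only [altGo]
              rw [if_neg (by exact fun h => hnA h),
                  if_neg (by rw [List.isPrefixOf_iff_prefix]; exact pn)]
            rw [hshift, hB, ← ih]
            rfl

-- ===== VERDICT (by name: the statement is the Claim_ definition above) =====
theorem first_applicability_result_spec : Claim_equal_first_applicability_result := by
  intro response _
  show _ = _
  rw [A_eq, first_applicability_result_alt, main_eq]
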